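-- pv_equiv track=rewrite | github.com/haolunc/ARC-RL | reference_solutions/solutions/6e02f1e3.py | transform
-- ===== SOURCE A (Python) =====
-- def transform(grid):
--
--     n = len(grid)
--
--     distinct = set()
--     for row in grid:
--         distinct.update(row)
--     k = len(distinct)
--
--     out = [[0 for _ in range(n)] for _ in range(n)]
--
--     if k == 1:
--
--         for j in range(n):
--             out[0][j] = 5
--     elif k == 2:
--
--         for i in range(n):
--             out[i][i] = 5
--     else:
--
--         for i in range(n):
--             out[i][n - 1 - i] = 5
--
--     return out
-- ===== SOURCE B (Python) =====
-- def transform(grid):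
--     n = len(grid)
--     # distinct-count by sort-and-scan: k = number of boundaries in the sorted flattening
--     flat = sorted(x for row in grid for x in row)
--     k = (1 if flat else 0) + sum(1 for a, b in zip(flat, flat[1:]) if a != b)
--     if k == 1:
--         # grid is nonempty here (k == 1 needs at least one cell)
--         return [[5] * n] + [[0] * n for _ in range(n - 1)]
--     c = (lambda i: i) if k == 2 else (lambda i: n - 1 - i)
--     return [[0] * c(i) + [5] + [0] * (n - 1 - c(i)) for i in range(n)]
-- ===== Notes on version B (the rewrite author's own statement) =====
-- stated objective: alternative
-- what changed: Distinct-count is computed by sorting the flattened grid and counting adjacent-value boundaries instead of building a set, and the output is assembled from whole rows (replicated-zero segments concatenated around the 5) instead of mutating a preallocated zero grid with one of three targeted index loops.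
import Mathlib
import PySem

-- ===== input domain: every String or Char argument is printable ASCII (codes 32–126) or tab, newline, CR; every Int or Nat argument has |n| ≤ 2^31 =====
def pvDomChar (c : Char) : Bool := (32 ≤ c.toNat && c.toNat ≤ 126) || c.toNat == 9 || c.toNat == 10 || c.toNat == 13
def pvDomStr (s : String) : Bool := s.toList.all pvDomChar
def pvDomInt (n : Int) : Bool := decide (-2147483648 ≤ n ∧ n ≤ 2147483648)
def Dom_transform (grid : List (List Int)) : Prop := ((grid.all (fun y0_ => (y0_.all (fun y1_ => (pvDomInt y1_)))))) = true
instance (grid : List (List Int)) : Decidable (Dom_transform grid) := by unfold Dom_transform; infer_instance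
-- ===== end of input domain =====

-- B counts distinct colors by sorting the flattened grid and counting adjacent-value
-- boundaries (no set), and assembles the output from whole rows built by concatenation
-- (replicated zeros around the 5) instead of mutating a preallocated zero grid (objective: alternative).

-- ===== PORT A =====
def transform (grid : List (List Int)) : List (List Int) :=
  let n := grid.length
  let k := PySem.Set.len (grid.foldl (fun s row => PySem.Set.update s row) PySem.Set.empty)
  let out := (List.range n).map (fun _ => (List.range n).map (fun _ => (0 : Int)))
  if k = 1 then
    (List.range n).foldl (fun g j => g.modify 0 (fun row => row.set j 5)) out
  else if k = 2 then
    (List.range n).foldl (fun g i => g.modify i (fun row => row.set i 5)) out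
  else
    (List.range n).foldl (fun g i => g.modify i (fun row => row.set (n - 1 - i) 5)) out

-- ===== PORT B =====
def transform_alt (grid : List (List Int)) : List (List Int) :=
  let n := grid.length
  let flat := PySem.List.sorted grid.flatten (fun x => x) false
  let k : Int := (if flat = [] then 0 else 1) +
    ((flat.zip flat.tail).map (fun p => if p.1 ≠ p.2 then (1 : Int) else 0)).sum
  if k = 1 then
    [List.replicate n (5 : Int)] ++ (List.range (n - 1)).map (fun _ => List.replicate n (0 : Int))
  else
    let c : Nat → Nat := if k = 2 then (fun i => i) else (fun i => n - 1 - i)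
    (List.range n).map (fun i =>
      List.replicate (c i) (0 : Int) ++ [(5 : Int)] ++ List.replicate (n - 1 - c i) (0 : Int))

-- ===== PRECONDITION & SPEC =====
def Spec_transform (grid : List (List Int)) (out : List (List Int)) : Prop := out = transform_alt grid
instance (grid : List (List Int)) (out : List (List Int)) : Decidable (Spec_transform grid out) := by unfold Spec_transform; infer_instance

-- ===== CLAIM (what is proved, stated in full; the proofs are below) =====
def Claim_equal_transform : Prop := ∀ (grid : List (List Int)), Dom_transform grid → Spec_transform grid (transform grid)

-- ===== LEMMAS AND PROOFS =====

-- a fold whose step preserves length preserves length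
theorem pv_foldl_length_inv {α β : Type} (step : List α → β → List α)
    (hstep : ∀ g j, (step g j).length = g.length) :
    ∀ (l : List β) (g : List α), (l.foldl step g).length = g.length := by
  intro l
  induction l with
  | nil => intro g; rfl
  | cons j l ih => intro g; rw [List.foldl_cons, ih, hstep]

-- pointwise value of a fold of writes at pairwise-distinct indices
theorem pv_foldl_set_getElem {α : Type} (l : List Nat) (hnd : l.Nodup) (v : Nat → α)
    (r : List α) (m : Nat) (h : m < r.length) :
    (l.foldl (fun r j => r.set j (v j)) r)[m]'(by
        rw [pv_foldl_length_inv _ (fun g j => by simp)]; exact h)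
      = if m ∈ l then v m else r[m] := by
  induction l generalizing r with
  | nil => simp
  | cons j l ih =>
    rcases List.nodup_cons.mp hnd with ⟨hj, hl⟩
    simp only [List.foldl_cons]
    rw [ih hl (r.set j (v j)) (by simpa using h)]
    by_cases hmem : m ∈ l
    · have : m ≠ j := fun e => hj (e ▸ hmem)
      simp [hmem, this]
    · by_cases hmj : m = j
      · subst hmj; simp [hmem]
      · simp [hmem, hmj, Ne.symm hmj]

-- pointwise value of a fold modifying pairwise-distinct rows
theorem pv_foldl_modify_getElem {α : Type} (l : List Nat) (hnd : l.Nodup) (f : Nat → α → α)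
    (g : List α) (i : Nat) (h : i < g.length) :
    (l.foldl (fun g j => (g.modify j (f j) : List α)) g)[i]'(by
        rw [pv_foldl_length_inv _ (fun g j => by simp [List.length_modify])]; exact h)
      = if i ∈ l then f i g[i] else g[i] := by
  induction l generalizing g with
  | nil => simp
  | cons j l ih =>
    rcases List.nodup_cons.mp hnd with ⟨hj, hl⟩
    simp only [List.foldl_cons]
    rw [ih hl (g.modify j (f j)) (by simpa [List.length_modify] using h)]
    by_cases hmem : i ∈ l
    · have hij : i ≠ j := fun e => hj (e ▸ hmem)
      simp [hmem, Ne.symm hij]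
    · by_cases hij : i = j
      · subst hij; simp [hmem]
      · simp [hmem, hij, Ne.symm hij]

-- pointwise value of a fold repeatedly modifying row 0
theorem pv_foldl_modify0_getElem {α : Type} (l : List Nat) (t : Nat → α → α)
    (g : List α) (i : Nat) (h : i < g.length) :
    (l.foldl (fun g j => (g.modify 0 (t j) : List α)) g)[i]'(by
        rw [pv_foldl_length_inv _ (fun g j => by simp [List.length_modify])]; exact h)
      = if i = 0 then l.foldl (fun r j => t j r) g[i] else g[i] := by
  induction l generalizing g with
  | nil => simp
  | cons j l ih =>
    simp only [List.foldl_cons]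
    rw [ih (g.modify 0 (t j)) (by simpa [List.length_modify] using h)]
    by_cases hi : i = 0
    · subst hi; simp
    · simp [hi, Ne.symm hi]

-- the boundary scan of a weakly increasing list counts its distinct values
theorem pv_scan_sorted (s : List Int) (hs : s.Pairwise (· ≤ ·)) :
    (if s = [] then (0 : Int) else 1) +
      ((s.zip s.tail).map (fun p => if p.1 ≠ p.2 then (1 : Int) else 0)).sum
      = (s.toFinset.card : Int) := by
  induction s with
  | nil => simp
  | cons a t ih =>
    cases t with
    | nil => simp
    | cons b u =>
      have hmem : ∀ x ∈ b :: u, a ≤ x := (List.pairwise_cons.mp hs).1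
      have hab : a ≤ b := hmem b (List.mem_cons_self ..)
      have htp : (b :: u).Pairwise (· ≤ ·) := (List.pairwise_cons.mp hs).2
      have ih' := ih htp
      simp only [List.tail_cons, List.zip_cons_cons, List.map_cons, List.sum_cons,
        if_neg (List.cons_ne_nil b u), if_neg (List.cons_ne_nil a (b::u))] at ih' ⊢
      by_cases hEq : a = b
      · have hcard : (a :: b :: u).toFinset = (b :: u).toFinset := by
          subst hEq; simp [List.toFinset_cons]
        rw [hcard, ← ih']
        simp [hEq]
      · have hanot : a ∉ (b :: u).toFinset := by
          intro h
          rcases List.mem_cons.mp (List.mem_toFinset.mp h) with h | h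
          · exact hEq h
          · have : b ≤ a := (List.pairwise_cons.mp htp).1 a h
            exact hEq (le_antisymm hab this)
        have hcard : (a :: b :: u).toFinset.card = (b :: u).toFinset.card + 1 := by
          rw [List.toFinset_cons, Finset.card_insert_of_notMem (by simpa using hanot)]
        rw [hcard]
        simp only [ne_eq, hEq, not_false_eq_true, if_true]
        push_cast
        linarith [ih']

-- A's set-fold distinct count equals the cardinality of the flattened grid's value set
theorem pv_distinct_eq (grid : List (List Int)) :
    PySem.Set.len (grid.foldl (fun s row => PySem.Set.update s row) PySem.Set.empty)
      = (grid.flatten.toFinset.card : Int) := by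
  have h1 : grid.foldl (fun s row => PySem.Set.update s row) PySem.Set.empty
      = PySem.Set.ofList grid.flatten := by
    rw [PySem.Set.ofList_eq_foldl, List.foldl_flatten]
    rfl
  rw [h1]
  have h2 : (PySem.Set.ofList grid.flatten).toFinset = grid.flatten.toFinset := by
    apply Finset.ext; intro x
    simp [PySem.Set.mem_ofList]
  have h3 := List.toFinset_card_of_nodup (PySem.Set.nodup_ofList grid.flatten)
  rw [← h2, h3]
  simp [PySem.Set.len]

-- the one-hot row built by concatenation, read pointwise
theorem pv_oneHot_get (c n j : Nat) (hc : c < n) (hj : j < n) :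
    (List.replicate c (0 : Int) ++ [(5 : Int)] ++ List.replicate (n - 1 - c) (0 : Int))[j]'(by
        simp; omega)
      = if j = c then 5 else 0 := by
  rcases lt_trichotomy j c with h | h | h
  · rw [List.getElem_append_left (by simp; omega)]
    rw [List.getElem_append_left (by simp; omega)]
    simp [List.getElem_replicate, Nat.ne_of_lt h]
  · subst h
    rw [List.getElem_append_left (by simp)]
    rw [List.getElem_append_right (by simp)]
    simp
  · rw [List.getElem_append_right (by simp; omega)]
    simp [List.getElem_replicate, Nat.ne_of_gt h]

-- ===== VERDICT (by name: the statement is the Claim_ definition above) =====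
theorem transform_spec : Claim_equal_transform := by
  intro grid _
  show transform grid = transform_alt grid
  simp only [transform, transform_alt]
  set n := grid.length with hn
  -- both distinct counts equal the cardinality of the flattened grid's value set
  set flat := PySem.List.sorted grid.flatten (fun x => x) false with hflat
  have hkA := pv_distinct_eq grid
  have hperm : flat.Perm grid.flatten := PySem.List.sorted_perm ..
  have hfs : flat.toFinset = grid.flatten.toFinset := by
    apply Finset.ext; intro x
    simp [List.mem_toFinset, hperm.mem_iff]
  have hkB : (if flat = [] then (0 : Int) else 1) +
      ((flat.zip flat.tail).map (fun p => if p.1 ≠ p.2 then (1 : Int) else 0)).sum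
      = (grid.flatten.toFinset.card : Int) := by
    rw [pv_scan_sorted flat (by simpa using PySem.List.sorted_pairwise grid.flatten (fun x => x)),
      hfs]
  rw [hkA, hkB]
  set zrow : List Int := (List.range n).map (fun _ => (0 : Int)) with hz
  have zrep : zrow = List.replicate n (0 : Int) := by
    rw [hz, List.map_const', List.length_range]
  have zlen : zrow.length = n := by simp [hz]
  set out : List (List Int) := (List.range n).map (fun _ => zrow) with ho
  have olen : out.length = n := by simp [ho]
  have oget : ∀ (i : Nat) (hi : i < out.length), out[i] = zrow := by
    intro i hi; simp [ho]
  by_cases h1 : (grid.flatten.toFinset.card : Int) = 1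
  · rw [if_pos h1, if_pos h1]
    -- grid is nonempty: one distinct value needs at least one cell
    have hfne : grid.flatten ≠ [] := by
      intro he; rw [he] at h1; simp at h1
    have hn1 : 1 ≤ n := by
      rcases grid with _ | ⟨r, gs⟩
      · exact absurd rfl hfne
      · simp [hn]
    apply List.ext_getElem
    · rw [pv_foldl_length_inv _ (fun g j => by simp [List.length_modify])]
      simp [olen]; omega
    · intro i hL hR
      have hi : i < n := by
        rw [pv_foldl_length_inv _ (fun g j => by simp [List.length_modify])] at hL
        omega
      have hio : i < out.length := by omega
      rw [pv_foldl_modify0_getElem (List.range n) (fun j (row : List Int) => row.set j 5) out i hio]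
      rw [oget i hio]
      by_cases hi0 : i = 0
      · subst hi0
        rw [if_pos rfl, List.getElem_append_left (by simp)]
        simp only [List.getElem_singleton]
        apply List.ext_getElem
        · rw [pv_foldl_length_inv _ (fun g j => by simp)]
          simp [zlen]
        · intro j hjL hjR
          have hj : j < n := by simpa using hjR
          have hjz : j < zrow.length := by omega
          rw [pv_foldl_set_getElem (List.range n) List.nodup_range (fun _ => (5 : Int)) zrow j hjz]
          simp [hj]
      · rw [if_neg hi0, List.getElem_append_right (by simp; omega)]
        simp only [List.getElem_map]
        exact zrep
  · rw [if_neg h1, if_neg h1]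
    by_cases h2 : (grid.flatten.toFinset.card : Int) = 2
    · rw [if_pos h2, if_pos h2]
      apply List.ext_getElem
      · rw [pv_foldl_length_inv _ (fun g j => by simp [List.length_modify])]
        simp [olen]
      · intro i hL hR
        have hi : i < n := by simpa using hR
        have hio : i < out.length := by omega
        rw [pv_foldl_modify_getElem (List.range n) List.nodup_range
              (fun i (row : List Int) => row.set i 5) out i hio]
        rw [oget i hio, if_pos (List.mem_range.mpr hi)]
        simp only [List.getElem_map, List.getElem_range]
        apply List.ext_getElem
        · simp [zlen]; omega
        · intro j hjL hjR
          have hj : j < n := by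
            simp at hjR; omega
          have hjz : j < zrow.length := by omega
          rw [pv_oneHot_get i n j hi hj]
          simp only [List.getElem_set, zrep, List.getElem_replicate]
          by_cases hij : i = j
          · simp [hij]
          · simp [hij, Ne.symm hij]
    · rw [if_neg h2, if_neg h2]
      apply List.ext_getElem
      · rw [pv_foldl_length_inv _ (fun g j => by simp [List.length_modify])]
        simp [olen]
      · intro i hL hR
        have hi : i < n := by simpa using hR
        have hio : i < out.length := by omega
        rw [pv_foldl_modify_getElem (List.range n) List.nodup_range
              (fun i (row : List Int) => row.set (n - 1 - i) 5) out i hio]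
        rw [oget i hio, if_pos (List.mem_range.mpr hi)]
        simp only [List.getElem_map, List.getElem_range]
        apply List.ext_getElem
        · simp [zlen]; omega
        · intro j hjL hjR
          have hj : j < n := by
            simp at hjR; omega
          have hjz : j < zrow.length := by omega
          rw [pv_oneHot_get (n - 1 - i) n j (by omega) hj]
          simp only [List.getElem_set, zrep, List.getElem_replicate]
          by_cases hij : n - 1 - i = j
          · simp [hij]
          · simp [hij, Ne.symm hij]
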